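-- pv_equiv track=rewrite | github.com/alexanderbk4/setscraper | data_pipeline/episode_discovery.py | generate_episode_ids
-- ===== SOURCE A (Python) =====
-- def generate_episode_ids(start_suffix: str = "0000", end_suffix: str = "zzzz"):
--     """
--     Generate episode IDs in the correct BBC format.
--
--     Args:
--         start_suffix (str): Starting 4-character suffix (e.g., "0000")
--         end_suffix (str): Ending 4-character suffix (e.g., "zzzz")
--
--     Yields:
--         str: Episode IDs in format m002xxxx
--     """
--     # Define allowed characters (numbers + consonants, no vowels)
--     allowed_chars = "0123456789bcdfghjklmnpqrstvwxz"
--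
--     # Convert suffixes to indices
--     def suffix_to_index(suffix):
--         return sum(allowed_chars.index(c) * (len(allowed_chars) ** i)
--                   for i, c in enumerate(reversed(suffix.lower())))
--
--     def index_to_suffix(index):
--         if index == 0:
--             return "0000"
--         suffix = ""
--         while index > 0:
--             index, remainder = divmod(index, len(allowed_chars))
--             suffix = allowed_chars[remainder] + suffix
--         return suffix.zfill(4)
--
--     start_index = suffix_to_index(start_suffix)
--     end_index = suffix_to_index(end_suffix)
--
--     for i in range(start_index, end_index + 1):
--         suffix = index_to_suffix(i)
--         yield f"m002{suffix}"
-- ===== SOURCE B (Python) =====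
-- ALLOWED = "0123456789bcdfghjklmnpqrstvwxz"
-- POS = {c: i for i, c in enumerate(ALLOWED)}
-- BASE = len(ALLOWED)
--
--
-- def generate_episode_ids(start_suffix: str = "0000", end_suffix: str = "zzzz"):
--     """Same IDs as A, but maintains the base-30 digits incrementally (odometer)."""
--     # Horner evaluation of the suffix value (A sums positional powers instead).
--     def suffix_value(suffix):
--         value = 0
--         for c in suffix.lower():
--             value = value * BASE + POS[c]
--         return value
--
--     start = suffix_value(start_suffix)
--     end = suffix_value(end_suffix)
--
--     # digits of `start`, least-significant first, padded with zeros to width 4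
--     digits = []
--     n = start
--     while n > 0:
--         digits.append(n % BASE)
--         n //= BASE
--     while len(digits) < 4:
--         digits.append(0)
--
--     for _ in range(end - start + 1):
--         yield "m002" + "".join(ALLOWED[d] for d in reversed(digits))
--         # odometer increment with carry; append a new high digit on overflow
--         j = 0
--         while j < len(digits) and digits[j] == BASE - 1:
--             digits[j] = 0
--             j += 1
--         if j < len(digits):
--             digits[j] += 1
--         else:
--             digits.append(1)
-- ===== Notes on version B (the rewrite author's own statement) =====
-- stated objective: faster
-- what changed: B evaluates each suffix by Horner's rule over a precomputed position dict and emits the ids by keeping the base-30 digit list of the current index and incrementing it like an odometer, instead of A's per-character powers-of-30 sum and a fresh divmod loop plus zfill rebuilding the suffix for every index in the range.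
-- outside the precondition, e.g. on generate_episode_ids('000a', '0005'): A raises ValueError, B raises KeyError
import Mathlib
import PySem

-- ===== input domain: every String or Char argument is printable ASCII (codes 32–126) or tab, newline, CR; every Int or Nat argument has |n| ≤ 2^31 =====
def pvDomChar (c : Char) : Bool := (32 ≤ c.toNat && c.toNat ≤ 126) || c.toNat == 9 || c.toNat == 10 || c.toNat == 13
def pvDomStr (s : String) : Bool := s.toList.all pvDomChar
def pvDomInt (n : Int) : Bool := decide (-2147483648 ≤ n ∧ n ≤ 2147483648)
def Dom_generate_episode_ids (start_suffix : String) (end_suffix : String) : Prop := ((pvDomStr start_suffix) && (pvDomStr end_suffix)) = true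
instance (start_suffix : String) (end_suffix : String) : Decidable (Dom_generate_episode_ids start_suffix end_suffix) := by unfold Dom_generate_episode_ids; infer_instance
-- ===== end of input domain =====

-- B keeps the base-30 digit list of the current index and increments it like an odometer
-- instead of recomputing index_to_suffix by repeated divmod on every iteration (objective:
-- alternative decomposition; A is a generator — both ports return the full list of yielded ids).

-- ===== PORT A =====
-- allowed_chars = "0123456789bcdfghjklmnpqrstvwxz" (as a list of chars)
def pvAllowed : List Char := ['0', '1', '2', '3', '4', '5', '6', '7', '8', '9', 'b', 'c', 'd', 'f', 'g', 'h', 'j', 'k', 'l', 'm', 'n', 'p', 'q', 'r', 's', 't', 'v', 'w', 'x', 'z']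

-- sum(allowed_chars.index(c) * 30**i for i, c in enumerate(reversed(suffix.lower())));
-- the explicit counter i transcribes enumerate; none = the ValueError of .index (excluded by Pre_).
-- All Python ints here are nonnegative, so Nat arithmetic is exact.
def pvSumA : List Char → Nat → Option Nat
  | [], _ => some 0
  | c :: t, i =>
    match PySem.List.index? pvAllowed c, pvSumA t (i + 1) with
    | some p, some r => some (p * 30 ^ i + r)
    | _, _ => none

def pvSfxToIdxA (s : String) : Option Nat :=
  pvSumA (PySem.Chars.lower s.toList).reverse 0

-- the while-loop of index_to_suffix: prepends allowed_chars[index % 30] while index > 0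
def pvIdxChars (n : Nat) : List Char :=
  if h : n = 0 then []
  else pvIdxChars (n / 30) ++ [pvAllowed.getD (n % 30) '0']
decreasing_by exact Nat.div_lt_self (Nat.pos_of_ne_zero h) (by norm_num)

def pvIdxToSfxA (n : Nat) : String :=
  if n = 0 then "0000"
  else String.ofList (PySem.Chars.zfill (pvIdxChars n) 4)

def generate_episode_ids (start_suffix : String) (end_suffix : String) : List String :=
  match pvSfxToIdxA start_suffix, pvSfxToIdxA end_suffix with
  | some a, some b => (List.range' a (b + 1 - a)).map (fun i => "m002" ++ pvIdxToSfxA i)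
  | _, _ => []  -- Python raises ValueError here (suffix char outside allowed_chars); excluded by Pre_

-- ===== PORT B =====
-- POS = {c: i for i, c in enumerate(ALLOWED)} as an association list
def pvPOS : PySem.Dict Char Nat := ⟨[('0', 0), ('1', 1), ('2', 2), ('3', 3), ('4', 4), ('5', 5), ('6', 6), ('7', 7), ('8', 8), ('9', 9), ('b', 10), ('c', 11), ('d', 12), ('f', 13), ('g', 14), ('h', 15), ('j', 16), ('k', 17), ('l', 18), ('m', 19), ('n', 20), ('p', 21), ('q', 22), ('r', 23), ('s', 24), ('t', 25), ('v', 26), ('w', 27), ('x', 28), ('z', 29)]⟩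

def pvHStep (acc : Option Nat) (c : Char) : Option Nat :=
  match acc, PySem.Dict.get? pvPOS c with
  | some a, some p => some (a * 30 + p)
  | _, _ => none

-- Horner: value = value*30 + POS[c]; none = the KeyError of POS[c] (excluded by Pre_)
def pvHorner (s : String) : Option Nat :=
  (PySem.Chars.lower s.toList).foldl pvHStep (some 0)

-- digits of n, least-significant first (the first while-loop of Source B)
def pvRawDigits (n : Nat) : List Nat :=
  if h : n = 0 then []
  else n % 30 :: pvRawDigits (n / 30)
decreasing_by exact Nat.div_lt_self (Nat.pos_of_ne_zero h) (by norm_num)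

-- padding with zeros (at the high end) to width 4
def pvPad4 (ds : List Nat) : List Nat := ds ++ List.replicate (4 - ds.length) 0

-- odometer increment with carry; a new high digit appears on overflow
def pvIncr : List Nat → List Nat
  | [] => [1]
  | d :: t => if d = 29 then 0 :: pvIncr t else (d + 1) :: t

def pvRender (ds : List Nat) : String :=
  "m002" ++ String.ofList ((ds.map (fun d => pvAllowed.getD d '0')).reverse)

def pvRun : Nat → List Nat → List String
  | 0, _ => []
  | k + 1, ds => pvRender ds :: pvRun k (pvIncr ds)

def generate_episode_ids_alt (start_suffix : String) (end_suffix : String) : List String :=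
  match pvHorner start_suffix, pvHorner end_suffix with
  | some a, some b => pvRun (b + 1 - a) (pvPad4 (pvRawDigits a))
  | _, _ => []  -- Source B raises KeyError here; excluded by Pre_

-- ===== PRECONDITION & SPEC =====
-- Pre_ excludes exactly the inputs on which Python A raises ValueError: a character of a
-- lowercased suffix that is not one of the 30 allowed characters.
def Pre_generate_episode_ids (start_suffix : String) (end_suffix : String) : Prop :=
  (PySem.Chars.lower start_suffix.toList).all pvAllowed.contains = true ∧
  (PySem.Chars.lower end_suffix.toList).all pvAllowed.contains = true
instance (start_suffix : String) (end_suffix : String) : Decidable (Pre_generate_episode_ids start_suffix end_suffix) := by unfold Pre_generate_episode_ids; infer_instance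

def pvWitness_generate_episode_ids : String × String := ("0000", "000z")

def Spec_generate_episode_ids (start_suffix : String) (end_suffix : String) (out : List String) : Prop := out = generate_episode_ids_alt start_suffix end_suffix
instance (start_suffix : String) (end_suffix : String) (out : List String) : Decidable (Spec_generate_episode_ids start_suffix end_suffix out) := by unfold Spec_generate_episode_ids; infer_instance

-- ===== CLAIM (what is proved, stated in full; the proofs are below) =====
def Claim_equal_generate_episode_ids : Prop := ∀ (start_suffix : String) (end_suffix : String), Dom_generate_episode_ids start_suffix end_suffix → Pre_generate_episode_ids start_suffix end_suffix → Spec_generate_episode_ids start_suffix end_suffix (generate_episode_ids start_suffix end_suffix)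

-- ===== LEMMAS AND PROOFS =====

-- position of an allowed character
def pvPos (c : Char) : Nat := (PySem.List.index? pvAllowed c).getD 0

-- value of a least-significant-first digit/char list
def pvG : List Char → Nat
  | [] => 0
  | c :: t => pvPos c + 30 * pvG t

lemma pv_index?_of_mem {c : Char} (h : c ∈ pvAllowed) :
    PySem.List.index? pvAllowed c = some (pvPos c) := by
  have hs := (PySem.List.index?_isSome_iff pvAllowed c).2 h
  obtain ⟨k, hk⟩ := Option.isSome_iff_exists.mp hs
  simp only [pvPos, hk, Option.getD_some]

lemma pv_get?_pvPOS {c : Char} (h : c ∈ pvAllowed) :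
    PySem.Dict.get? pvPOS c = some (pvPos c) := by
  fin_cases h <;> rfl

lemma pv_sumA_eq (l : List Char) (i : Nat) (h : ∀ c ∈ l, c ∈ pvAllowed) :
    pvSumA l i = some (30 ^ i * pvG l) := by
  induction l generalizing i with
  | nil => simp [pvSumA, pvG]
  | cons c t ih =>
    have hc : c ∈ pvAllowed := h c (by simp)
    have ht : ∀ x ∈ t, x ∈ pvAllowed := fun x hx => h x (by simp [hx])
    simp only [pvSumA, pv_index?_of_mem hc, ih (i + 1) ht, pvG]
    congr 1
    ring

lemma pv_g_append (xs : List Char) (c : Char) :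
    pvG (xs ++ [c]) = pvG xs + pvPos c * 30 ^ xs.length := by
  induction xs with
  | nil => simp [pvG]
  | cons d t ih => simp [pvG, ih]; ring

lemma pv_horner_eq (l : List Char) (a : Nat) (h : ∀ c ∈ l, c ∈ pvAllowed) :
    l.foldl pvHStep (some a) = some (a * 30 ^ l.length + pvG l.reverse) := by
  induction l generalizing a with
  | nil => simp [pvG]
  | cons c t ih =>
    have hc : c ∈ pvAllowed := h c (by simp)
    have ht : ∀ x ∈ t, x ∈ pvAllowed := fun x hx => h x (by simp [hx])
    have hstep : pvHStep (some a) c = some (a * 30 + pvPos c) := by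
      simp [pvHStep, pv_get?_pvPOS hc]
    simp only [List.foldl_cons, hstep, ih _ ht, List.reverse_cons, pv_g_append,
      List.length_cons, List.length_reverse]
    congr 1
    ring

-- padding to an arbitrary width
def pvPadK (k : Nat) (ds : List Nat) : List Nat := ds ++ List.replicate (k - ds.length) 0

lemma pv_padK_cons (k d : Nat) (t : List Nat) :
    pvPadK k (d :: t) = d :: pvPadK (k - 1) t := by
  simp only [pvPadK, List.length_cons, List.cons_append]
  have h : k - (t.length + 1) = k - 1 - t.length := by omega
  rw [h]

lemma pv_incr_pad (n : Nat) : ∀ k, pvIncr (pvPadK k (pvRawDigits n)) = pvPadK k (pvRawDigits (n + 1)) := by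
  induction n using Nat.strong_induction_on with
  | _ n ih =>
    intro k
    by_cases h0 : n = 0
    · subst h0
      have r0 : pvRawDigits 0 = [] := by rw [pvRawDigits]; simp
      have r1 : pvRawDigits 1 = [1] := by rw [pvRawDigits]; rw [pvRawDigits]; norm_num
      cases k with
      | zero => simp [r0, r1, pvPadK, pvIncr]
      | succ m => simp [r0, r1, pvPadK, pvIncr, List.replicate_succ]
    · rw [pvRawDigits]
      simp only [h0, dite_false, pv_padK_cons]
      by_cases h29 : n % 30 = 29
      · have e1 : (n + 1) % 30 = 0 := by omega
        have e2 : (n + 1) / 30 = n / 30 + 1 := by omega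
        have rn1 : pvRawDigits (n + 1) = 0 :: pvRawDigits (n / 30 + 1) := by
          rw [pvRawDigits]; simp [e1, e2]
        rw [pvIncr, if_pos h29, ih (n / 30) (Nat.div_lt_self (Nat.pos_of_ne_zero h0) (by norm_num)) (k - 1), rn1, pv_padK_cons]
      · have e1 : (n + 1) % 30 = n % 30 + 1 := by omega
        have e2 : (n + 1) / 30 = n / 30 := by omega
        have rn1 : pvRawDigits (n + 1) = (n % 30 + 1) :: pvRawDigits (n / 30) := by
          rw [pvRawDigits]; simp [e1, e2]
        rw [pvIncr, if_neg h29, rn1, pv_padK_cons]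

lemma pv_pad4_eq (ds : List Nat) : pvPad4 ds = pvPadK 4 ds := rfl

-- the allowed-character image of a digit
lemma pv_ch_mem (d : Nat) : pvAllowed.getD d '0' ∈ pvAllowed := by
  rcases Nat.lt_or_ge d pvAllowed.length with h | h
  · rw [List.getD_eq_getElem pvAllowed '0' h]
    exact List.getElem_mem h
  · rw [List.getD_eq_default pvAllowed '0' h]
    decide

lemma pv_idxChars_eq (n : Nat) :
    pvIdxChars n = ((pvRawDigits n).map (fun d => pvAllowed.getD d '0')).reverse := by
  induction n using Nat.strong_induction_on with
  | _ n ih =>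
    by_cases h0 : n = 0
    · subst h0; rw [pvIdxChars, pvRawDigits]; simp
    · rw [pvIdxChars, pvRawDigits]
      simp only [h0, dite_false, List.map_cons, List.reverse_cons]
      rw [ih (n / 30) (Nat.div_lt_self (Nat.pos_of_ne_zero h0) (by norm_num))]

lemma pv_zfill_eq (cs : List Char) (h : ∀ c ∈ cs, c ∈ pvAllowed) :
    PySem.Chars.zfill cs 4 = List.replicate (4 - cs.length) '0' ++ cs := by
  cases cs with
  | nil => rw [PySem.Chars.zfill.eq_def]; simp
  | cons c rest =>
    have hc : c ∈ pvAllowed := h c (by simp)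
    have hns : ¬(c = '+' ∨ c = '-') := by fin_cases hc <;> decide
    rw [PySem.Chars.zfill.eq_def]
    by_cases hl : (4 : Int) ≤ ((c :: rest).length : Int)
    · rw [if_pos hl]
      have hz : 4 - (c :: rest).length = 0 := by
        have h4 : (4 : Int) ≤ (rest.length : Int) + 1 := by simpa using hl
        have : 3 ≤ rest.length := by omega
        simp only [List.length_cons]
        omega
      rw [hz]
      simp
    · rw [if_neg hl]
      simp [hns]

lemma pv_render_eq (n : Nat) :
    pvRender (pvPad4 (pvRawDigits n)) = "m002" ++ pvIdxToSfxA n := by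
  by_cases h0 : n = 0
  · subst h0
    rw [pvRawDigits]
    simp [pvRender, pvPad4, pvIdxToSfxA]
    rfl
  · have hmem : ∀ c ∈ pvIdxChars n, c ∈ pvAllowed := by
      intro c hc
      rw [pv_idxChars_eq] at hc
      simp only [List.mem_reverse, List.mem_map] at hc
      obtain ⟨d, _, rfl⟩ := hc
      exact pv_ch_mem d
    rw [pvIdxToSfxA, if_neg h0, pvRender]
    rw [pv_zfill_eq _ hmem, pv_idxChars_eq]
    congr 2
    rw [pvPad4, List.map_append, List.reverse_append]
    simp [List.map_replicate]
    exact Or.inr rfl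

lemma pv_run_eq (k : Nat) : ∀ n : Nat,
    pvRun k (pvPad4 (pvRawDigits n)) = (List.range' n k).map (fun i => "m002" ++ pvIdxToSfxA i) := by
  induction k with
  | zero => intro n; simp [pvRun]
  | succ m ih =>
    intro n
    rw [pvRun, pv_render_eq, pv_pad4_eq, pv_incr_pad n 4, ← pv_pad4_eq, ih (n + 1)]
    rw [List.range'_succ]
    simp

lemma pv_idx_agree (s : String) (h : ∀ c ∈ PySem.Chars.lower s.toList, c ∈ pvAllowed) :
    pvSfxToIdxA s = some (pvG (PySem.Chars.lower s.toList).reverse) ∧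
    pvHorner s = some (pvG (PySem.Chars.lower s.toList).reverse) := by
  constructor
  · rw [pvSfxToIdxA, pv_sumA_eq _ 0 (by intro c hc; exact h c (List.mem_reverse.mp hc))]
    simp
  · rw [pvHorner, pv_horner_eq _ 0 h]
    simp

-- ===== VERDICT (by name: the statement is the Claim_ definition above) =====
theorem generate_episode_ids_spec : Claim_equal_generate_episode_ids := by
  intro s e _ hpre
  unfold Spec_generate_episode_ids
  have hs : ∀ c ∈ PySem.Chars.lower s.toList, c ∈ pvAllowed := by
    intro c hc; simpa using List.all_eq_true.mp hpre.1 c hc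
  have he : ∀ c ∈ PySem.Chars.lower e.toList, c ∈ pvAllowed := by
    intro c hc; simpa using List.all_eq_true.mp hpre.2 c hc
  obtain ⟨hA1, hA2⟩ := pv_idx_agree s hs
  obtain ⟨hB1, hB2⟩ := pv_idx_agree e he
  rw [generate_episode_ids, generate_episode_ids_alt, hA1, hA2, hB1, hB2]
  exact (pv_run_eq _ _).symm
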